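-- pv_equiv track=rewrite | github.com/pypi-data/pypi-mirror-395 | packages/sm-py-bc/sm_py_bc-0.1.1.tar.gz/sm_py_bc-0.1.1/src/sm_bc/crypto/signers/standard_dsa_encoding.py | _length_bytes_count
-- ===== SOURCE A (Python) =====
-- def _length_bytes_count(length: int) -> int:
--     """
--     Calculate number of bytes needed to encode a length.
--
--     Args:
--         length: Length value
--
--     Returns:
--         Number of bytes needed
--     """
--     if length < 0x80:
--         return 1
--     else:
--         count = 1
--         temp = length
--         while temp > 0:
--             count += 1
--             temp = temp >> 8
--         return count
-- ===== SOURCE B (Python) =====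
-- def _length_bytes_count(length: int) -> int:
--     if length < 0x80:
--         return 1
--     return (length.bit_length() + 7) // 8 + 1
-- ===== Notes on version B (the rewrite author's own statement) =====
-- stated objective: idiomatic
-- what changed: Replaces the byte-at-a-time shift loop with a closed form computed from length.bit_length().
import Mathlib
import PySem

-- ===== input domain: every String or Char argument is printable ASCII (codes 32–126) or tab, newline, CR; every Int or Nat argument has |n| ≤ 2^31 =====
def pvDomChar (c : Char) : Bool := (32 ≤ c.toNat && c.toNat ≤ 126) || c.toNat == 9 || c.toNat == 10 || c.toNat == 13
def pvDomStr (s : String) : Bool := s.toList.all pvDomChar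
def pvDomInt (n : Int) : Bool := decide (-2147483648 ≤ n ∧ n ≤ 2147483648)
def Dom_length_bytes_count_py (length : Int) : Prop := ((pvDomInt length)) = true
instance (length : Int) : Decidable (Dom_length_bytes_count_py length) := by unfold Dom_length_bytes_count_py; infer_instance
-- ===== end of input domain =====

-- B replaces A's byte-at-a-time shift loop with a closed form from the bit length (idiomatic).

-- ===== PORT A =====
-- the 'while temp > 0: count += 1; temp = temp >> 8' loop, state (count, temp)
def pyLoopA (count : Int) (temp : Int) : Int :=
  if temp > 0 then pyLoopA (count + 1) (temp >>> (8 : Nat)) else count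
termination_by temp.toNat
decreasing_by
  simp only [Int.shiftRight_eq_div_pow]
  omega

def length_bytes_count_py (length : Int) : Int :=
  if length < 0x80 then 1
  else pyLoopA 1 length

-- ===== PORT B =====
-- length.bit_length() for length ≥ 0 is Nat.size length.toNat
def length_bytes_count_py_alt (length : Int) : Int :=
  if length < 0x80 then 1
  else ((Nat.size length.toNat : Int) + 7) / 8 + 1

-- ===== PRECONDITION & SPEC =====
def Spec_length_bytes_count_py (length : Int) (out : Int) : Prop := out = length_bytes_count_py_alt length
instance (length : Int) (out : Int) : Decidable (Spec_length_bytes_count_py length out) := by unfold Spec_length_bytes_count_py; infer_instance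

-- ===== CLAIM (what is proved, stated in full; the proofs are below) =====
def Claim_equal_length_bytes_count_py : Prop := ∀ (length : Int), Dom_length_bytes_count_py length → Spec_length_bytes_count_py length (length_bytes_count_py length)

-- ===== LEMMAS AND PROOFS =====

-- bit length drops by 8 when dividing by 256 (truncated at 0)
theorem size_div_256 (n : Nat) : Nat.size (n / 256) = Nat.size n - 8 := by
  rcases Nat.lt_or_ge n 256 with h | h
  · have h0 : n / 256 = 0 := Nat.div_eq_of_lt h
    have hs : Nat.size n ≤ 8 := Nat.size_le.mpr h
    simp [h0, Nat.size_zero]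
    omega
  · apply Nat.le_antisymm
    · rw [Nat.size_le]
      have hn : n < 2 ^ Nat.size n := Nat.lt_size_self n
      have h8 : 8 ≤ Nat.size n := Nat.lt_size.mpr (by omega : 2 ^ 7 ≤ n)
      have : n < 2 ^ (Nat.size n - 8) * 256 := by
        have : 2 ^ (Nat.size n - 8) * 256 = 2 ^ Nat.size n := by
          rw [show (256 : Nat) = 2 ^ 8 from rfl, ← pow_add]
          congr 1; omega
        omega
      omega
    · have h8 : 9 ≤ Nat.size n := Nat.lt_size.mpr (by omega : 2 ^ 8 ≤ n)
      have hlow : 2 ^ (Nat.size n - 1) ≤ n :=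
        Nat.lt_size.mp (by omega)
      have : 2 ^ (Nat.size n - 9) ≤ n / 256 := by
        apply Nat.le_div_iff_mul_le (by norm_num) |>.mpr
        calc 2 ^ (Nat.size n - 9) * 256 = 2 ^ (Nat.size n - 9) * 2 ^ 8 := by norm_num
          _ = 2 ^ (Nat.size n - 9 + 8) := by rw [← pow_add]
          _ ≤ 2 ^ (Nat.size n - 1) := Nat.pow_le_pow_right (by norm_num) (by omega)
          _ ≤ n := hlow
      have := Nat.lt_size.mpr this
      omega

-- the loop counts one step per byte of temp: ⌈size/8⌉ iterations
theorem pyLoopA_eq (n : Nat) : ∀ c : Int, pyLoopA c (n : Int) = c + ((Nat.size n + 7) / 8 : Nat) := by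
  induction n using Nat.strong_induction_on with
  | _ n ih =>
    intro c
    rw [pyLoopA]
    by_cases h : (n : Int) > 0
    · have hn : 0 < n := by exact_mod_cast h
      have hcast : ((n : Int) >>> (8 : Nat)) = ((n >>> 8 : Nat) : Int) :=
        (Int.natCast_shiftRight n 8).symm
      rw [if_pos h, hcast, ih (n >>> 8) (by simp [Nat.shiftRight_eq_div_pow]; omega)]
      have hdiv : (n >>> 8) = n / 256 := by simp [Nat.shiftRight_eq_div_pow]
      rw [hdiv, size_div_256]
      have hs : 1 ≤ Nat.size n := Nat.lt_size.mpr (by simpa using hn)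
      have : (Nat.size n + 7) / 8 = (Nat.size n - 8 + 7) / 8 + 1 := by omega
      rw [this]
      push_cast
      ring
    · have hn : n = 0 := by omega
      subst hn
      simp

-- ===== VERDICT (by name: the statement is the Claim_ definition above) =====
theorem length_bytes_count_py_spec : Claim_equal_length_bytes_count_py := by
  intro length _
  unfold Spec_length_bytes_count_py length_bytes_count_py length_bytes_count_py_alt
  by_cases h : length < 0x80
  · simp [h]
  · rw [if_neg h, if_neg h]
    have hpos : 0 ≤ length := by omega
    have hrep : length = (length.toNat : Int) := (Int.toNat_of_nonneg hpos).symm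
    rw [hrep, pyLoopA_eq length.toNat 1]
    have : ((Nat.size length.toNat + 7) / 8 : Nat) = (((Nat.size length.toNat : Int) + 7) / 8 : Int) := by
      omega
    simp only [Int.toNat_natCast] at this ⊢
    omega
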